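-- pv_equiv track=rewrite | github.com/Amstrad74/project_001 | DTC/encript_lib.py | generate_hex_codes
-- ===== SOURCE A (Python) =====
-- def is_forbidden_code(code):
--     """
--     Проверяет, является ли код запрещённым.
--
--     :param code: Целое число, представляющее код символа.
--     :return: True, если код запрещён, иначе False.
--     """
--     forbidden_codes = {
--         0x20, 0x21, 0x22, 0x23, 0x24, 0x25, 0x26, 0x27, 0x28, 0x29, 0x2A, 0x2B, 0x2C, 0x2D, 0x2E, 0x2F,
--         0x3A, 0x3B, 0x3C, 0x3D, 0x3E, 0x3F, 0x40, 0x5B, 0x5C, 0x5D, 0x5E, 0x5F, 0x60, 0x7B, 0x7C, 0x7D, 0x7E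
--     }
--     return code in forbidden_codes
--
-- def generate_hex_codes(count):
--     """
--     Генерирует список шестнадцатеричных кодов в порядке возрастания для заданного количества слов.
--
--     :param count: Количество слов.
--     :return: Список шестнадцатеричных кодов.
--     """
--     codes = []
--     current = 0  # Начинаем с нулевого кода
--
--     while len(codes) < count:
--         # Преобразуем текущий код в байты
--         byte_length = (current.bit_length() + 7) // 8  # Определяем необходимую длину в байтах
--         byte_list = current.to_bytes(byte_length, byteorder='big')
--         # Проверяем, что все байты не запрещены
--         if all(not is_forbidden_code(b) for b in byte_list):
--             hex_str = byte_list.hex()  # Преобразуем в шестнадцатеричную строку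
--             codes.append(hex_str)
--             if len(codes) == count:
--                 break
--
--         # Увеличиваем текущий код на 1
--         current += 1
--         # Проверяем, не превысили ли мы максимальное значение для текущей длины байтов
--         if current.bit_length() > 32:
--             raise ValueError("Количество кодов слишком велико для генерации.")
--
--     if len(codes) < count:
--         raise ValueError("Недостаточно кодов для генерации заданного количества.")
--
--     return codes
-- ===== SOURCE B (Python) =====
-- def generate_hex_codes(count):
--     """
--     Enumerate the valid codes directly by byte-length: '' first, then for each
--     length L = 1..4 all strings over the allowed-byte alphabet (leading byte
--     nonzero), in ascending order, instead of scanning and testing every integer.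
--     """
--     if count < 1:
--         return []
--     allowed = [b for b in range(256)
--                if not (0x20 <= b <= 0x2F or 0x3A <= b <= 0x40
--                        or 0x5B <= b <= 0x60 or 0x7B <= b <= 0x7E)]
--     codes = ['']
--     tails = ['']
--     L = 0
--     while len(codes) < count:
--         L += 1
--         if L > 4:
--             raise ValueError("Количество кодов слишком велико для генерации.")
--         if L > 1:
--             tails = [format(a, '02x') + s for a in allowed for s in tails]
--         for a in allowed:
--             if a == 0:
--                 continue
--             pa = format(a, '02x')
--             for s in tails:
--                 codes.append(pa + s)
--                 if len(codes) == count: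
--                     return codes
--     return codes
-- ===== Notes on version B (the rewrite author's own statement) =====
-- stated objective: faster
-- what changed: Instead of scanning every integer 0..2^32 and testing each byte of its representation against the forbidden set, B generates the valid codes directly: '' first, then for each byte-length L=1..4 all strings over the precomputed allowed-byte alphabet (leading byte nonzero) in ascending order, stopping at count.
import Mathlib
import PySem

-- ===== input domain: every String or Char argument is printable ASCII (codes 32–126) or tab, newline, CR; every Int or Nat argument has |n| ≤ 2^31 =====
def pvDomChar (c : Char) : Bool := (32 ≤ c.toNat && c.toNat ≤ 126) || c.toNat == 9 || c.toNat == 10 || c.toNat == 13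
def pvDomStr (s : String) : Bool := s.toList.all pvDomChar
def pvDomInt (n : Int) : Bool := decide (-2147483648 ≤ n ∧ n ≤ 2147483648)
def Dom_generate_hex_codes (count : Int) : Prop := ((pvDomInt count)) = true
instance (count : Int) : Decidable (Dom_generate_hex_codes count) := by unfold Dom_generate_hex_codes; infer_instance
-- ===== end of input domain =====

-- B re-implements A by enumerating the valid codes directly by byte-length over the
-- allowed-byte alphabet instead of scanning and testing every integer (measurably faster).

-- ===== PORT A =====

-- A's forbidden set literal
def forbiddenCodes : List Nat :=
  [0x20, 0x21, 0x22, 0x23, 0x24, 0x25, 0x26, 0x27, 0x28, 0x29, 0x2A, 0x2B, 0x2C, 0x2D, 0x2E, 0x2F,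
   0x3A, 0x3B, 0x3C, 0x3D, 0x3E, 0x3F, 0x40, 0x5B, 0x5C, 0x5D, 0x5E, 0x5F, 0x60, 0x7B, 0x7C, 0x7D, 0x7E]

def is_forbidden_code (code : Nat) : Bool := forbiddenCodes.contains code

-- Python int.bit_length() for n ≥ 0
def pyBitLength (n : Nat) : Nat := if n = 0 then 0 else Nat.log2 n + 1

-- Python n.to_bytes(L, 'big') as a list of byte values (exact for n < 256^L)
def toBytes (L : Nat) (n : Nat) : List Nat :=
  match L with
  | 0 => []
  | L + 1 => toBytes L (n / 256) ++ [n % 256]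

-- lowercase hex digit
def hexDigitChar (n : Nat) : Char := if n < 10 then Char.ofNat (48 + n) else Char.ofNat (87 + n)

-- format(b, '02x') for a byte value
def h2 (b : Nat) : String := String.mk [hexDigitChar (b / 16), hexDigitChar (b % 16)]

-- bytes.hex() (lowercase)
def bytesHex : List Nat → String
  | [] => ""
  | b :: bs => h2 b ++ bytesHex bs

-- helper for the termination argument of the while loop
theorem pyBitLength_gt32_iff (m : Nat) : 32 < pyBitLength m ↔ 2 ^ 32 ≤ m := by
  unfold pyBitLength
  rcases Nat.eq_zero_or_pos m with h | h
  · simp [h]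
  · have hm : m ≠ 0 := by omega
    rw [if_neg hm, show (32 < Nat.log2 m + 1 ↔ ¬ Nat.log2 m < 32) by omega, Nat.log2_lt hm]
    omega

-- A's while loop: scan current = 0,1,2,… collecting hex codes until count are found;
-- the two branches returning early where Python raises ValueError are unreachable on Dom.
def aLoop (count : Int) (codes : List String) (current : Nat) : List String :=
  if (codes.length : Int) < count then
    let byte_length := (pyBitLength current + 7) / 8
    let byte_list := toBytes byte_length current
    if byte_list.all (fun b => !is_forbidden_code b) then
      let codes' := codes ++ [bytesHex byte_list]
      if (codes'.length : Int) = count then codes'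
      else if 32 < pyBitLength (current + 1) then codes'   -- Python: raise ValueError
      else aLoop count codes' (current + 1)
    else
      if 32 < pyBitLength (current + 1) then codes          -- Python: raise ValueError
      else aLoop count codes (current + 1)
  else codes
termination_by 2 ^ 32 - current
decreasing_by
  · rename_i h1 h2 h3 h4
    have := (pyBitLength_gt32_iff (current + 1)).not.mp (by simpa using h4)
    omega
  · rename_i h1 h2 h3
    have := (pyBitLength_gt32_iff (current + 1)).not.mp (by simpa using h3)
    omega

def generate_hex_codes (count : Int) : List String := aLoop count [] 0

-- ===== PORT B =====

-- B's arithmetic allowed-byte test (the same four forbidden ranges, complemented)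
def allowedPred (b : Nat) : Bool :=
  !((0x20 ≤ b && b ≤ 0x2F) || (0x3A ≤ b && b ≤ 0x40) || (0x5B ≤ b && b ≤ 0x60) || (0x7B ≤ b && b ≤ 0x7E))

def allowedList : List Nat := (List.range 256).filter allowedPred

-- inner 'for s in tails' loop: append pa+s until len(codes) == count (flag = early return)
def bEmit (count : Int) (pa : String) (codes : List String) : List String → List String × Bool
  | [] => (codes, false)
  | s :: rest =>
    let codes' := codes ++ [pa ++ s]
    if (codes'.length : Int) = count then (codes', true) else bEmit count pa codes' rest

-- outer 'for a in allowed' loop, skipping a = 0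
def bOuter (count : Int) (tails : List String) (codes : List String) : List Nat → List String × Bool
  | [] => (codes, false)
  | a :: rest =>
    if a = 0 then bOuter count tails codes rest
    else
      match bEmit count (h2 a) codes tails with
      | (c, done) => if done then (c, true) else bOuter count tails c rest

-- B's while loop over byte-lengths; the L > 4 early return is Python's ValueError, unreachable on Dom
def bLoop (count : Int) (codes : List String) (tails : List String) (L : Nat) : List String :=
  if (codes.length : Int) < count then
    let L' := L + 1
    if 4 < L' then codes                                    -- Python: raise ValueError
    else
      let tails' := if 1 < L' then allowedList.flatMap (fun a => tails.map (fun s => h2 a ++ s)) else tails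
      match bOuter count tails' codes allowedList with
      | (c, done) => if done then c else bLoop count c tails' L'
  else codes
termination_by 4 - L
decreasing_by omega

def generate_hex_codes_alt (count : Int) : List String :=
  if count < 1 then [] else bLoop count [""] [""] 0

-- ===== PRECONDITION & SPEC =====
def Spec_generate_hex_codes (count : Int) (out : List String) : Prop := out = generate_hex_codes_alt count
instance (count : Int) (out : List String) : Decidable (Spec_generate_hex_codes count out) := by unfold Spec_generate_hex_codes; infer_instance

-- ===== CLAIM (what is proved, stated in full; the proofs are below) =====
def Claim_equal_generate_hex_codes : Prop := ∀ (count : Int), Dom_generate_hex_codes count → Spec_generate_hex_codes count (generate_hex_codes count)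

-- ===== LEMMAS AND PROOFS =====

-- minimal big-endian base-256 digits of n (Python's minimal to_bytes / hex view)
def mdigits (n : Nat) : List Nat :=
  if h : n = 0 then [] else mdigits (n / 256) ++ [n % 256]
decreasing_by exact Nat.div_lt_self (by omega) (by omega)

def okN (n : Nat) : Bool := (mdigits n).all (fun b => !is_forbidden_code b)
def hexN (n : Nat) : String := bytesHex (mdigits n)
def okF (L n : Nat) : Bool := (toBytes L n).all (fun b => !is_forbidden_code b)

-- all hex strings over the allowed alphabet of byte-length L, ascending
def strs : Nat → List String
  | 0 => [""]
  | L + 1 => allowedList.flatMap (fun a => (strs L).map (fun s => h2 a ++ s))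

-- the block of codes of byte-length L+1 (leading byte nonzero), ascending
def blockStr (L : Nat) : List String :=
  (allowedList.filter (fun a => a ≠ 0)).flatMap (fun a => (strs L).map (fun s => h2 a ++ s))

def remBlocks (L : Nat) : List String := (List.range' L (4 - L)).flatMap blockStr

theorem mdigits_zero : mdigits 0 = [] := by simp [mdigits]

theorem mdigits_pos {n : Nat} (h : n ≠ 0) : mdigits n = mdigits (n / 256) ++ [n % 256] := by
  rw [mdigits]; simp [h]

theorem toBytes_cons (L : Nat) : ∀ d r, d < 256 → r < 256 ^ L →
    toBytes (L + 1) (d * 256 ^ L + r) = d :: toBytes L r := by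
  induction L with
  | zero =>
    intro d r hd hr
    have hr0 : r = 0 := by omega
    subst hr0
    simp [toBytes, Nat.mod_eq_of_lt hd, Nat.div_eq_of_lt hd]
  | succ L ih =>
    intro d r hd hr
    have hform : d * 256 ^ (L + 1) + r = 256 * (d * 256 ^ L) + r := by ring
    have h1 : (d * 256 ^ (L + 1) + r) / 256 = d * 256 ^ L + r / 256 := by
      rw [hform, Nat.mul_add_div (by norm_num)]
    have h2 : (d * 256 ^ (L + 1) + r) % 256 = r % 256 := by
      rw [hform, Nat.mul_add_mod]
    show toBytes (L + 1) ((d * 256 ^ (L + 1) + r) / 256) ++ [(d * 256 ^ (L + 1) + r) % 256] = _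
    rw [h1, h2, ih d (r / 256) hd (by rw [pow_succ] at hr; omega)]
    simp [toBytes]

theorem mdigits_eq : ∀ L n, 256 ^ L ≤ n → n < 256 ^ (L + 1) → mdigits n = toBytes (L + 1) n := by
  intro L
  induction L with
  | zero =>
    intro n h1 h2
    rw [pow_zero] at h1
    rw [zero_add, pow_one] at h2
    rw [mdigits_pos (by omega : n ≠ 0), Nat.div_eq_of_lt h2, mdigits_zero]
    simp [toBytes]
  | succ L ih =>
    intro n h1 h2
    have hp : 0 < 256 ^ (L + 1) := by positivity
    rw [mdigits_pos (by omega : n ≠ 0)]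
    have hd1 : 256 ^ L ≤ n / 256 := by
      rw [Nat.le_div_iff_mul_le (by norm_num)]
      rw [pow_succ] at h1; omega
    have hd2 : n / 256 < 256 ^ (L + 1) := by
      rw [Nat.div_lt_iff_lt_mul (by norm_num)]
      rw [pow_succ] at h2; omega
    rw [ih (n / 256) hd1 hd2]
    rfl

theorem toBytes_bitLength (n : Nat) : toBytes ((pyBitLength n + 7) / 8) n = mdigits n := by
  rcases eq_or_ne n 0 with h | h
  · subst h
    rw [mdigits_zero]
    rfl
  · have hlen : (pyBitLength n + 7) / 8 = Nat.log2 n / 8 + 1 := by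
      simp only [pyBitLength, h, if_false, if_neg h]
      omega
    rw [hlen]
    have hlow : 256 ^ (Nat.log2 n / 8) ≤ n := by
      calc 256 ^ (Nat.log2 n / 8) = 2 ^ (8 * (Nat.log2 n / 8)) := by
            rw [show (256 : Nat) = 2 ^ 8 by norm_num, ← pow_mul]
        _ ≤ 2 ^ Nat.log2 n := Nat.pow_le_pow_right (by norm_num) (by omega)
        _ ≤ n := Nat.log2_self_le h
    have hhigh : n < 256 ^ (Nat.log2 n / 8 + 1) := by
      calc n < 2 ^ (Nat.log2 n + 1) := Nat.lt_log2_self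
        _ ≤ 2 ^ (8 * (Nat.log2 n / 8 + 1)) := Nat.pow_le_pow_right (by norm_num) (by omega)
        _ = 256 ^ (Nat.log2 n / 8 + 1) := by
            rw [show (256 : Nat) = 2 ^ 8 by norm_num, ← pow_mul]
    exact (mdigits_eq _ n hlow hhigh).symm

theorem rangeMul (a b : Nat) :
    List.range (a * b) = (List.range a).flatMap (fun d => (List.range b).map (fun r => d * b + r)) := by
  induction a with
  | zero => simp
  | succ a ih =>
    rw [show (a + 1) * b = a * b + b by ring, List.range_add, ih, List.range_succ]
    simp [List.flatMap_append, mul_comm]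

theorem flatMap_if {α β : Type} (l : List α) (p : α → Bool) (g : α → List β) :
    l.flatMap (fun x => if p x then g x else []) = (l.filter p).flatMap g := by
  induction l with
  | nil => rfl
  | cons x l ih => by_cases h : p x <;> simp [List.filter_cons, h, ih]

set_option maxRecDepth 100000 in
theorem range_filter_allowed :
    (List.range 256).filter (fun d => !is_forbidden_code d) = allowedList := by decide

set_option maxRecDepth 100000 in
theorem range'_filter_allowed :
    (List.range' 1 255).filter (fun d => !is_forbidden_code d) = allowedList.filter (fun a => a ≠ 0) := by
  decide

set_option maxRecDepth 100000 in
theorem allowedList_length : allowedList.length = 223 := by decide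

set_option maxRecDepth 100000 in
theorem allowedNZ_length : (allowedList.filter (fun a => a ≠ 0)).length = 222 := by decide

theorem inner_step (L d : Nat) (hd : d < 256) :
    ∀ l : List Nat, (∀ r ∈ l, r < 256 ^ L) →
      ((l.map (fun r => d * 256 ^ L + r)).filter (okF (L + 1))).map
          (fun n => bytesHex (toBytes (L + 1) n))
        = if (!is_forbidden_code d) = true then
            ((l.filter (okF L)).map (fun n => bytesHex (toBytes L n))).map (fun s => h2 d ++ s)
          else [] := by
  intro l hl
  induction l with
  | nil => by_cases h : (!is_forbidden_code d) = true <;> simp [h]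
  | cons r l ih =>
    have hr : r < 256 ^ L := hl r (by simp)
    have hrec := ih (fun x hx => hl x (by simp [hx]))
    have hc : toBytes (L + 1) (d * 256 ^ L + r) = d :: toBytes L r := toBytes_cons L d r hd hr
    have hcond : okF (L + 1) (d * 256 ^ L + r) = ((!is_forbidden_code d) && okF L r) := by
      simp [okF, hc]
    have hhex : bytesHex (toBytes (L + 1) (d * 256 ^ L + r))
        = h2 d ++ bytesHex (toBytes L r) := by
      rw [hc]; rfl
    simp only [List.map_cons, List.filter_cons, hcond]
    cases hb : is_forbidden_code d with
    | false =>
      simp only [hb, Bool.not_false, Bool.true_and, if_pos] at hrec ⊢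
      cases h2 : okF L r with
      | false => simpa [h2] using hrec
      | true => simp [h2, hhex, hrec]
    | true =>
      simp only [hb, Bool.not_true, Bool.false_and, Bool.false_eq_true, if_false] at hrec ⊢
      exact hrec

theorem strsP : ∀ L, ((List.range (256 ^ L)).filter (okF L)).map (fun n => bytesHex (toBytes L n)) = strs L := by
  intro L
  induction L with
  | zero =>
    simp [List.range_one, okF, toBytes, bytesHex, strs]
  | succ L ih =>
    rw [show (256 : Nat) ^ (L + 1) = 256 * 256 ^ L by ring, rangeMul, List.filter_flatMap,
       List.map_flatMap]
    rw [List.flatMap_congr (fun d hd =>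
      inner_step L d (List.mem_range.mp hd) _ (fun r hr => List.mem_range.mp hr))]
    simp only [ih]
    rw [flatMap_if, range_filter_allowed]
    rfl

theorem range_split (a b : Nat) (h : a ≤ b) :
    List.range b = List.range a ++ List.range' a (b - a) := by
  conv_lhs => rw [show b = a + (b - a) by omega]
  rw [List.range_add, ← List.range'_eq_map_range]

theorem range256_cons : List.range 256 = 0 :: List.range' 1 255 := by
  rw [List.range_eq_range']
  rfl

theorem blockQ (L : Nat) :
    ((List.range' (256 ^ L) (256 ^ (L + 1) - 256 ^ L)).filter okN).map hexN = blockStr L := by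
  have hle : 256 ^ L ≤ 256 ^ (L + 1) := Nat.pow_le_pow_right (by norm_num) (by omega)
  have hsplit : List.range' (256 ^ L) (256 ^ (L + 1) - 256 ^ L)
      = (List.range' 1 255).flatMap (fun d => (List.range (256 ^ L)).map (fun r => d * 256 ^ L + r)) := by
    have h1 := range_split (256 ^ L) (256 ^ (L + 1)) hle
    have h2 : List.range (256 ^ (L + 1)) = List.range (256 ^ L) ++
        (List.range' 1 255).flatMap (fun d => (List.range (256 ^ L)).map (fun r => d * 256 ^ L + r)) := by
      rw [show (256 : Nat) ^ (L + 1) = 256 * 256 ^ L by ring, rangeMul, range256_cons,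
         List.flatMap_cons]
      simp
    exact List.append_cancel_left (h1.symm.trans h2)
  rw [hsplit, List.filter_flatMap, List.map_flatMap]
  have step : ∀ d ∈ List.range' 1 255,
      (((List.range (256 ^ L)).map (fun r => d * 256 ^ L + r)).filter okN).map hexN
        = if (!is_forbidden_code d) = true then (strs L).map (fun s => h2 d ++ s) else [] := by
    intro d hd
    obtain ⟨hd1, hd2⟩ := List.mem_range'.mp hd
    have key : ∀ r, r < 256 ^ L → mdigits (d * 256 ^ L + r) = toBytes (L + 1) (d * 256 ^ L + r) := by
      intro r hr
      apply mdigits_eq L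
      · have : 256 ^ L ≤ d * 256 ^ L := Nat.le_mul_of_pos_left _ (by omega)
        omega
      · have : d * 256 ^ L + r < 256 * 256 ^ L := by nlinarith
        rw [pow_succ]; omega
    have h1 : ((List.range (256 ^ L)).map (fun r => d * 256 ^ L + r)).filter okN
        = ((List.range (256 ^ L)).map (fun r => d * 256 ^ L + r)).filter (okF (L + 1)) := by
      apply List.filter_congr
      intro n hn
      obtain ⟨r, hr, rfl⟩ := List.mem_map.mp hn
      simp [okN, okF, key r (List.mem_range.mp hr)]
    have h2 : (((List.range (256 ^ L)).map (fun r => d * 256 ^ L + r)).filter (okF (L + 1))).map hexN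
        = (((List.range (256 ^ L)).map (fun r => d * 256 ^ L + r)).filter (okF (L + 1))).map
            (fun n => bytesHex (toBytes (L + 1) n)) := by
      apply List.map_congr_left
      intro n hn
      obtain ⟨r, hr, rfl⟩ := List.mem_map.mp (List.mem_of_mem_filter hn)
      simp [hexN, key r (List.mem_range.mp hr)]
    rw [h1, h2, inner_step L d (by omega) _ (fun r hr => List.mem_range.mp hr), strsP L]
  rw [List.flatMap_congr step, flatMap_if, range'_filter_allowed]
  rfl

theorem masterAux : ∀ L, ((List.range (256 ^ L)).filter okN).map hexN
    = "" :: (List.range L).flatMap blockStr := by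
  intro L
  induction L with
  | zero =>
    have : okN 0 = true := by simp [okN, mdigits_zero]
    simp [List.range_one, List.filter_cons, this, hexN, mdigits_zero, bytesHex]
  | succ L ih =>
    have hle : 256 ^ L ≤ 256 ^ (L + 1) := Nat.pow_le_pow_right (by norm_num) (by omega)
    rw [range_split (256 ^ L) (256 ^ (L + 1)) hle, List.filter_append, List.map_append, ih,
       blockQ L, List.range_succ, List.flatMap_append]
    simp

theorem sum_map_const {α : Type} (l : List α) (c : Nat) : (l.map (fun _ => c)).sum = l.length * c := by
  induction l with
  | nil => simp
  | cons x l ih => simp [ih]; ring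

theorem strs_length : ∀ L, (strs L).length = 223 ^ L := by
  intro L
  induction L with
  | zero => rfl
  | succ L ih =>
    rw [strs, List.length_flatMap]
    have : (fun a => ((strs L).map (fun s => h2 a ++ s)).length) = fun _ : Nat => 223 ^ L := by
      funext a; simp [ih]
    rw [show (List.map (fun a => ((strs L).map (fun s => h2 a ++ s)).length) allowedList)
        = allowedList.map (fun _ => 223 ^ L) by rw [this], sum_map_const, allowedList_length]
    ring

theorem blockStr_length (L : Nat) : (blockStr L).length = 222 * 223 ^ L := by
  rw [blockStr, List.length_flatMap]
  have : (fun a => ((strs L).map (fun s => h2 a ++ s)).length) = fun _ : Nat => 223 ^ L := by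
    funext a; simp [strs_length]
  rw [show (List.map (fun a => ((strs L).map (fun s => h2 a ++ s)).length)
      (allowedList.filter (fun a => a ≠ 0)))
      = (allowedList.filter (fun a => a ≠ 0)).map (fun _ => 223 ^ L) by rw [this],
     sum_map_const, allowedNZ_length]

theorem remBlocks_zero_eq : remBlocks 0 = (List.range 4).flatMap blockStr := by
  rw [remBlocks, ← List.range_eq_range']

theorem remBlocks_len : (remBlocks 0).length = 2472973440 := by
  rw [remBlocks_zero_eq, show List.range 4 = [0, 1, 2, 3] from rfl]
  simp [List.flatMap_cons, blockStr_length]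

theorem remBlocks_cons (L : Nat) (h : L < 4) : remBlocks L = blockStr L ++ remBlocks (L + 1) := by
  unfold remBlocks
  rw [show 4 - L = (4 - (L + 1)) + 1 by omega, List.range'_succ, List.flatMap_cons]

theorem filter_total_len : ((List.range (256 ^ 4)).filter okN).length = 2472973441 := by
  have h := congrArg List.length (masterAux 4)
  rw [List.length_map] at h
  rw [h, List.length_cons, ← remBlocks_zero_eq, remBlocks_len]

theorem aLoop_char (count : Int) :
    ∀ k current codes, current + k = 2 ^ 32 →
      count ≤ codes.length + (((List.range' current k).filter okN)).length →
      aLoop count codes current =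
        codes ++ ((((List.range' current k).filter okN)).map hexN).take ((count - codes.length).toNat) := by
  intro k
  induction k with
  | zero =>
    intro current codes hk hc
    simp only [List.range'_zero, List.filter_nil, List.length_nil] at hc ⊢
    rw [aLoop, if_neg (by push_cast at hc ⊢; omega)]
    simp
  | succ k ih =>
    intro current codes hk hc
    rw [List.range'_succ] at hc ⊢
    by_cases hcnt : (codes.length : Int) < count
    · rw [aLoop, if_pos hcnt]
      simp only [toBytes_bitLength]
      by_cases hok : okN current = true
      · rw [if_pos (show ((mdigits current).all fun b => !is_forbidden_code b) = true from hok)]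
        have hfc : (current :: List.range' (current + 1) k).filter okN
            = current :: (List.range' (current + 1) k).filter okN := by
          rw [List.filter_cons, if_pos hok]
        rw [hfc] at hc ⊢
        simp only [List.length_cons] at hc
        by_cases heq : ((codes ++ [bytesHex (mdigits current)]).length : Int) = count
        · rw [if_pos heq]
          simp only [List.length_append, List.length_cons, List.length_nil] at heq
          have ht : (count - (codes.length : Int)).toNat = 1 := by push_cast at heq ⊢; omega
          rw [List.map_cons, ht, List.take_succ_cons, List.take_zero]
          rfl
        · rw [if_neg heq]
          simp only [List.length_append, List.length_cons, List.length_nil] at heq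
          have hk0 : k ≠ 0 := by
            rintro rfl
            simp only [List.range'_zero, List.filter_nil, List.length_nil] at hc
            push_cast at hc heq hcnt
            omega
          rw [if_neg (by
            rw [pyBitLength_gt32_iff]
            omega)]
          have hrec := ih (current + 1) (codes ++ [bytesHex (mdigits current)]) (by omega)
            (by simp only [List.length_append, List.length_cons, List.length_nil]; push_cast at hc ⊢; omega)
          rw [hrec]
          have hlen : ((codes ++ [bytesHex (mdigits current)]).length : Int) = codes.length + 1 := by
            simp
          rw [List.map_cons]
          have ht : (count - (codes.length : Int)).toNat
              = ((count - ((codes ++ [bytesHex (mdigits current)]).length : Int)).toNat) + 1 := by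
            rw [hlen]; push_cast at hc heq hcnt ⊢; omega
          rw [ht, List.take_succ_cons, List.append_assoc]
          rfl
      · rw [if_neg (show ¬ ((mdigits current).all fun b => !is_forbidden_code b) = true from hok)]
        have hfc : (current :: List.range' (current + 1) k).filter okN
            = (List.range' (current + 1) k).filter okN := by
          rw [List.filter_cons, if_neg hok]
        rw [hfc] at hc ⊢
        have hk0 : k ≠ 0 := by
          rintro rfl
          simp only [List.range'_zero, List.filter_nil, List.length_nil] at hc
          push_cast at hc hcnt
          omega
        rw [if_neg (by
          rw [pyBitLength_gt32_iff]
          omega)]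
        exact ih (current + 1) codes (by omega) hc
    · rw [aLoop, if_neg hcnt]
      have ht : (count - (codes.length : Int)).toNat = 0 := by push_cast at hcnt ⊢; omega
      rw [ht, List.take_zero, List.append_nil]

theorem bEmit_char (count : Int) (pa : String) :
    ∀ items codes, (codes.length : Int) < count →
      bEmit count pa codes items
        = (codes ++ (items.map (fun s => pa ++ s)).take ((count - codes.length).toNat),
           decide (count ≤ codes.length + items.length)) := by
  intro items
  induction items with
  | nil =>
    intro codes h
    rw [bEmit]
    simp only [List.map_nil, List.take_nil, List.append_nil, List.length_nil]
    rw [decide_eq_false (by push_cast; omega)]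
  | cons s rest ih =>
    intro codes h
    rw [bEmit]
    simp only [List.length_append, List.length_cons, List.length_nil]
    by_cases heq : ((codes.length : Int) + (0 + 1)) = count
    · rw [if_pos (by push_cast; push_cast at heq; omega)]
      have ht : (count - (codes.length : Int)).toNat = 1 := by push_cast at heq ⊢; omega
      rw [List.map_cons, ht, List.take_succ_cons, List.take_zero]
      rw [decide_eq_true (by push_cast at heq ⊢; omega)]
    · rw [if_neg (by push_cast; push_cast at heq; omega)]
      have hrec := ih (codes ++ [pa ++ s]) (by simp; push_cast at heq ⊢; omega)
      rw [hrec]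
      have ht : (count - (codes.length : Int)).toNat
          = (count - ((codes ++ [pa ++ s]).length : Int)).toNat + 1 := by
        simp only [List.length_append, List.length_cons, List.length_nil]
        push_cast at heq h ⊢; omega
      rw [List.map_cons, ht, List.take_succ_cons, List.append_assoc]
      refine Prod.ext rfl ?_
      simp only [decide_eq_decide, List.length_append, List.length_cons, List.length_nil]
      push_cast
      constructor <;> omega

theorem bOuter_char (count : Int) (tails : List String) :
    ∀ (as : List Nat), ∀ codes : List String, (codes.length : Int) < count →
      bOuter count tails codes as
        = (codes ++ ((as.filter (fun a => a ≠ 0)).flatMap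
              (fun a => tails.map (fun s => h2 a ++ s))).take ((count - codes.length).toNat),
           decide (count ≤ codes.length + ((as.filter (fun a => a ≠ 0)).flatMap
              (fun a => tails.map (fun s => h2 a ++ s))).length)) := by
  intro as
  induction as with
  | nil =>
    intro codes h
    rw [bOuter]
    simp only [List.filter_nil, List.flatMap_nil, List.take_nil, List.append_nil, List.length_nil]
    rw [decide_eq_false (by push_cast; omega)]
  | cons a rest ih =>
    intro codes h
    rw [bOuter]
    by_cases ha : a = 0
    · rw [if_pos ha, ih codes h]
      simp [List.filter_cons, ha]
    · rw [if_neg ha, bEmit_char count (h2 a) tails codes h]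
      have hfc : (a :: rest).filter (fun a => a ≠ 0) = a :: rest.filter (fun a => a ≠ 0) := by
        simp [List.filter_cons, ha]
      rw [hfc, List.flatMap_cons]
      simp only [List.length_map]
      by_cases hdone : count ≤ (codes.length : Int) + tails.length
      · rw [decide_eq_true hdone]
        simp only [if_pos]
        have hle : (count - (codes.length : Int)).toNat ≤ (tails.map (fun s => h2 a ++ s)).length := by
          rw [List.length_map]; push_cast at hdone ⊢; omega
        rw [List.take_append_of_le_length hle]
        rw [decide_eq_true (by
          simp only [List.length_append, List.length_map]
          push_cast at hdone ⊢; omega)]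
      · rw [decide_eq_false hdone]
        simp only [Bool.false_eq_true, if_neg, not_false_iff]
        have hta : (count - (codes.length : Int)).toNat ≥ (tails.map (fun s => h2 a ++ s)).length := by
          rw [List.length_map]; push_cast at hdone ⊢; omega
        rw [List.take_of_length_le hta]
        rw [ih (codes ++ tails.map (fun s => h2 a ++ s)) (by
          simp only [List.length_append, List.length_map]
          push_cast at hdone ⊢; omega)]
        rw [List.take_append, List.take_of_length_le hta, List.append_assoc]
        have h1 : (count - ((codes ++ tails.map (fun s => h2 a ++ s)).length : Int)).toNat
            = (count - (codes.length : Int)).toNat - (tails.map (fun s => h2 a ++ s)).length := by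
          simp only [List.length_append, List.length_map]
          push_cast; omega
        rw [h1]
        refine Prod.ext rfl ?_
        simp only [decide_eq_decide, List.length_append, List.length_map]
        push_cast
        constructor <;> omega

theorem bLoop_char (count : Int) :
    ∀ j L (codes tails : List String), L + j = 4 → tails = strs (L - 1) →
      count ≤ codes.length + (remBlocks L).length →
      bLoop count codes tails L = codes ++ (remBlocks L).take ((count - codes.length).toNat) := by
  intro j
  induction j with
  | zero =>
    intro L codes tails hL ht hc
    have hL4 : L = 4 := by omega
    subst hL4
    have hrem : remBlocks 4 = [] := by simp [remBlocks]
    rw [hrem] at hc ⊢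
    simp only [List.length_nil, Nat.cast_zero, add_zero] at hc
    rw [bLoop, if_neg (by omega)]
    simp
  | succ j ih =>
    intro L codes tails hL ht hc
    have hL4 : L < 4 := by omega
    by_cases hcnt : (codes.length : Int) < count
    · rw [bLoop, if_pos hcnt, if_neg (by omega : ¬ (4 : Nat) < L + 1)]
      have htails' : (if 1 < L + 1 then
            allowedList.flatMap (fun a => tails.map (fun s => h2 a ++ s)) else tails) = strs L := by
        rcases Nat.eq_zero_or_pos L with h0 | h0
        · subst h0; rw [if_neg (by omega)]; simpa using ht
        · rw [if_pos (by omega), ht]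
          conv_rhs => rw [show L = (L - 1) + 1 by omega]
          rfl
      simp only [htails']
      rw [bOuter_char count (strs L) allowedList codes hcnt]
      have hbs : (allowedList.filter (fun a => a ≠ 0)).flatMap
          (fun a => (strs L).map (fun s => h2 a ++ s)) = blockStr L := rfl
      rw [hbs, remBlocks_cons L hL4]
      by_cases hdone : count ≤ (codes.length : Int) + (blockStr L).length
      · rw [decide_eq_true hdone]
        simp only [if_pos]
        rw [List.take_append_of_le_length (by push_cast at hdone ⊢; omega)]
      · rw [decide_eq_false hdone]
        simp only [Bool.false_eq_true, if_neg, not_false_iff]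
        have htk : (blockStr L).length ≤ (count - (codes.length : Int)).toNat := by
          push_cast at hdone ⊢; omega
        rw [List.take_of_length_le htk]
        rw [ih (L + 1) (codes ++ blockStr L) (strs L) (by omega)
          (by rw [show L + 1 - 1 = L by omega])
          (by
            rw [remBlocks_cons L hL4] at hc
            simp only [List.length_append, List.length_append] at hc ⊢
            push_cast at hc ⊢
            omega)]
        rw [List.take_append, List.take_of_length_le htk, List.append_assoc]
        have h1 : (count - ((codes ++ blockStr L).length : Int)).toNat
            = (count - (codes.length : Int)).toNat - (blockStr L).length := by
          simp only [List.length_append]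
          push_cast; omega
        rw [h1]
    · rw [bLoop, if_neg hcnt]
      have ht0 : (count - (codes.length : Int)).toNat = 0 := by omega
      rw [ht0, List.take_zero, List.append_nil]

theorem two32_eq : (2 : Nat) ^ 32 = 256 ^ 4 := by norm_num

theorem full_eq : ((List.range' 0 (2 ^ 32)).filter okN).map hexN = "" :: remBlocks 0 := by
  rw [← List.range_eq_range', two32_eq, masterAux 4, remBlocks_zero_eq]

-- ===== VERDICT (by name: the statement is the Claim_ definition above) =====
theorem generate_hex_codes_spec : Claim_equal_generate_hex_codes := by
  intro count hdom
  unfold Spec_generate_hex_codes generate_hex_codes generate_hex_codes_alt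
  have hcb : count ≤ 2147483648 := by
    unfold Dom_generate_hex_codes pvDomInt at hdom
    exact (of_decide_eq_true hdom).2
  have hflen : ((List.range' 0 (2 ^ 32)).filter okN).length = 2472973441 := by
    rw [← List.range_eq_range', two32_eq]; exact filter_total_len
  have hA := aLoop_char count (2 ^ 32) 0 [] (by omega)
    (by rw [hflen]; push_cast; omega)
  simp only [List.nil_append, List.length_nil, Nat.cast_zero, Int.sub_zero] at hA
  rw [hA, full_eq]
  by_cases hneg : count < 1
  · rw [if_pos hneg]
    have h0 : count.toNat = 0 := by omega
    rw [h0, List.take_zero]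
  · rw [if_neg hneg]
    have hrem : count ≤ (([""] : List String).length : Int) + ((remBlocks 0).length : Int) := by
      rw [remBlocks_len]; push_cast; omega
    rw [bLoop_char count 4 0 [""] [""] (by omega) rfl (by simpa using hrem)]
    have hct : count.toNat = (count - (([""] : List String).length : Int)).toNat + 1 := by
      simp only [List.length_cons, List.length_nil]
      omega
    rw [hct, List.take_succ_cons]
    rfl
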